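-- pv_equiv track=rewrite | github.com/jeffrpowell/outline-compiler | outline_compiler.py | _normalize_list_indentation
-- ===== SOURCE A (Python) =====
-- def _normalize_list_indentation(text: str) -> str:
--     """
--     Normalize list indentation from 2 spaces to 4 spaces.
--
--     The Python markdown library requires 4 spaces for nested lists,
--     but Outline uses 2 spaces. This function converts 2-space indentation
--     to 4-space indentation for proper nested list rendering.
--
--     Args:
--         text: Markdown text with 2-space list indentation
--
--     Returns:
--         Markdown text with 4-space list indentation
--     """
--     lines = text.split('\n')
--     normalized_lines = []
--
--     for line in lines:
--         # Check if line starts with spaces followed by a list marker (* or -)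
--         if line and (line.lstrip().startswith('* ') or line.lstrip().startswith('- ')):
--             # Count leading spaces
--             leading_spaces = len(line) - len(line.lstrip())
--
--             # If there are leading spaces (indicating nesting), double them
--             if leading_spaces > 0:
--                 # Double the indentation
--                 new_indent = ' ' * (leading_spaces * 2)
--                 normalized_lines.append(new_indent + line.lstrip())
--             else:
--                 # Top-level item, keep as is
--                 normalized_lines.append(line)
--         else:
--             # Not a list item, keep as is
--             normalized_lines.append(line)
--
--     return '\n'.join(normalized_lines)
-- ===== SOURCE B (Python) =====
-- def _normalize_list_indentation(text: str) -> str: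
--     # Single pass over the text: at each line start, measure the run of
--     # non-newline whitespace; if it is non-empty and a list marker follows,
--     # emit twice as many spaces, otherwise copy the run; then copy the line.
--     out = []
--     n = len(text)
--     i = 0
--     while i < n:
--         j = i
--         while j < n and text[j] != '\n' and text[j].isspace():
--             j += 1
--         if j > i and text[j:j + 2] in ('* ', '- '):
--             out.append(' ' * (2 * (j - i)))
--         else:
--             out.append(text[i:j])
--         k = j
--         while k < n and text[k] != '\n':
--             k += 1
--         out.append(text[j:k])
--         if k < n:
--             out.append('\n')
--             k += 1
--         i = k
--     return ''.join(out)
-- ===== Notes on version B (the rewrite author's own statement) =====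
-- stated objective: alternative
-- what changed: Replaces A's split-into-lines/lstrip/rejoin pipeline with a single left-to-right scan over the whole text that measures each line's leading whitespace run in place and rewrites it directly.
import Mathlib
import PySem

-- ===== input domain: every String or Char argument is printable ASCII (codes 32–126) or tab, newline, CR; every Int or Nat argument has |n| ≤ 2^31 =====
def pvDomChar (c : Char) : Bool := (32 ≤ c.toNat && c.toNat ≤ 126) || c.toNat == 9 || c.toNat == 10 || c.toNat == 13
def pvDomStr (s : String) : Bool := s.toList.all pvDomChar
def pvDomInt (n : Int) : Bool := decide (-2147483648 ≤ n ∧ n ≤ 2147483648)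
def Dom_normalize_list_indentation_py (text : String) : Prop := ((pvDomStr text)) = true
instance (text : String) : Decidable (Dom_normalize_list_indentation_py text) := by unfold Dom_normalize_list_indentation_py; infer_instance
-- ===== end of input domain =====

-- B: one scan over the text instead of A's split/lstrip/join pipeline; same return value (alternative decomposition, no speed claim).

-- ===== PORT A =====
-- per-line body of A's for-loop
def normLineA (line : List Char) : List Char :=
  if line ≠ [] ∧ (PySem.Chars.startswith (PySem.Chars.lstrip line) ['*', ' ']
                  || PySem.Chars.startswith (PySem.Chars.lstrip line) ['-', ' ']) = true then
    if line.length - (PySem.Chars.lstrip line).length > 0 then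
      List.replicate ((line.length - (PySem.Chars.lstrip line).length) * 2) ' ' ++ PySem.Chars.lstrip line
    else line
  else line

def normalize_list_indentation_py (text : String) : String :=
  String.mk (PySem.Chars.join ['\n'] ((PySem.Chars.splitOn text.toList ['\n']).map normLineA))

-- ===== PORT B =====
-- 'text[j] != '\n' and text[j].isspace()'
def wspB (c : Char) : Bool := c ≠ '\n' && PySem.Chars.isspace c

-- the replacement for the line's leading whitespace run ws (rest = the text from the marker on)
def headB (ws rest : List Char) : List Char :=
  if ws ≠ [] ∧ (rest.take 2 = ['*', ' '] ∨ rest.take 2 = ['-', ' '])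
  then List.replicate (2 * ws.length) ' ' else ws

def bGo (cs : List Char) : List Char :=
  headB (cs.takeWhile wspB) (cs.dropWhile wspB)
  ++ (cs.dropWhile wspB).takeWhile (fun c => c ≠ '\n')
  ++ (match h : (cs.dropWhile wspB).dropWhile (fun c => c ≠ '\n') with
      | [] => []
      | _ :: t => '\n' :: bGo t)
termination_by cs.length
decreasing_by
  have h1 : (cs.dropWhile wspB).length ≤ cs.length := List.length_dropWhile_le _ _
  have h2 : ((cs.dropWhile wspB).dropWhile (fun c => c ≠ '\n')).length ≤ (cs.dropWhile wspB).length :=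
    List.length_dropWhile_le _ _
  rw [h] at h2
  simp only [List.length_cons] at h2
  omega

def normalize_list_indentation_py_alt (text : String) : String :=
  String.mk (bGo text.toList)

-- ===== PRECONDITION & SPEC =====
def Spec_normalize_list_indentation_py (text : String) (out : String) : Prop := out = normalize_list_indentation_py_alt text
instance (text : String) (out : String) : Decidable (Spec_normalize_list_indentation_py text out) := by unfold Spec_normalize_list_indentation_py; infer_instance

-- ===== CLAIM (what is proved, stated in full; the proofs are below) =====
def Claim_equal_normalize_list_indentation_py : Prop := ∀ (text : String), Dom_normalize_list_indentation_py text → Spec_normalize_list_indentation_py text (normalize_list_indentation_py text)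

-- ===== LEMMAS AND PROOFS =====

-- reference splitter: mySplit pre l = the pieces of (pre ++ l) split on newline
def mySplit : List Char → List Char → List (List Char)
  | pre, [] => [pre]
  | pre, c :: t => if c = '\n' then pre :: mySplit [] t else mySplit (pre ++ [c]) t

theorem go_spec : ∀ (fuel : Nat) (l cur : List Char) (acc : List (List Char)), l.length < fuel →
    PySem.Chars.splitOn.go ['\n'] fuel l cur acc = acc.reverse ++ mySplit cur.reverse l := by
  intro fuel
  induction fuel with
  | zero => intro l cur acc h; omega
  | succ n ih =>
    intro l cur acc h
    cases l with
    | nil => simp [PySem.Chars.splitOn.go, mySplit]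
    | cons c rest =>
      by_cases hc : c = '\n'
      · subst hc
        have hp : List.isPrefixOf ['\n'] ('\n' :: rest) = true := by simp [List.isPrefixOf]
        simp only [PySem.Chars.splitOn.go, hp, if_pos, List.length_cons, List.length_nil,
          List.drop_succ_cons, List.drop_zero]
        rw [ih rest [] (cur.reverse :: acc) (by simp at h ⊢; omega)]
        simp [mySplit]
      · have hp : List.isPrefixOf ['\n'] (c :: rest) = false := by
          simp [List.isPrefixOf]
          exact fun hcc => hc hcc.symm
        simp only [PySem.Chars.splitOn.go, hp, Bool.false_eq_true, if_neg, not_false_iff]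
        rw [ih rest (c :: cur) acc (by simp at h ⊢; omega)]
        simp [mySplit, hc]

theorem splitOn_eq (cs : List Char) : PySem.Chars.splitOn cs ['\n'] = mySplit [] cs := by
  have := go_spec (cs.length + 1) cs [] [] (by omega)
  simpa [PySem.Chars.splitOn] using this

theorem mySplit_no_nl (l : List Char) (pre : List Char) (h : '\n' ∉ l) : mySplit pre l = [pre ++ l] := by
  induction l generalizing pre with
  | nil => simp [mySplit]
  | cons c t ih =>
    simp only [List.mem_cons, not_or] at h
    rw [mySplit, if_neg (fun e => h.1 e.symm), ih (pre ++ [c]) h.2]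
    simp

theorem mySplit_nl (p : List Char) (pre t : List Char) (h : '\n' ∉ p) :
    mySplit pre (p ++ '\n' :: t) = (pre ++ p) :: mySplit [] t := by
  induction p generalizing pre with
  | nil => simp [mySplit]
  | cons c q ih =>
    simp only [List.mem_cons, not_or] at h
    rw [List.cons_append, mySplit, if_neg (fun e => h.1 e.symm), ih (pre ++ [c]) h.2]
    simp

theorem mySplit_ne_nil (pre l : List Char) : mySplit pre l ≠ [] := by
  induction l generalizing pre with
  | nil => simp [mySplit]
  | cons c t ih =>
    rw [mySplit]
    split
    · simp
    · exact ih _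

-- on a newline-free list, B's whitespace test agrees with lstrip's
theorem takeWhile_wspB (l : List Char) (h : '\n' ∉ l) :
    l.takeWhile wspB = l.takeWhile PySem.Chars.isspace := by
  induction l with
  | nil => rfl
  | cons c t ih =>
    simp only [List.mem_cons, not_or] at h
    have hcne : c ≠ '\n' := fun e => h.1 e.symm
    have hw : wspB c = PySem.Chars.isspace c := by simp [wspB, hcne]
    simp only [List.takeWhile_cons, hw]
    split
    · rw [ih h.2]
    · rfl

theorem dropWhile_wspB (l : List Char) (h : '\n' ∉ l) :
    l.dropWhile wspB = l.dropWhile PySem.Chars.isspace := by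
  induction l with
  | nil => rfl
  | cons c t ih =>
    simp only [List.mem_cons, not_or] at h
    have hcne : c ≠ '\n' := fun e => h.1 e.symm
    have hw : wspB c = PySem.Chars.isspace c := by simp [wspB, hcne]
    simp only [List.dropWhile_cons, hw]
    split
    · exact ih h.2
    · rfl

theorem take2_marker (m : List Char) (hm : m = ['*', ' '] ∨ m = ['-', ' '])
    (rp t : List Char) : (rp ++ '\n' :: t).take 2 = m ↔ rp.take 2 = m := by
  rcases rp with _ | ⟨c1, _ | ⟨c2, rr⟩⟩ <;> rcases hm with hm | hm <;> subst hm <;> simp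

theorem headB_app (ws rp t : List Char) : headB ws (rp ++ '\n' :: t) = headB ws rp := by
  simp only [headB, take2_marker ['*', ' '] (Or.inl rfl) rp t, take2_marker ['-', ' '] (Or.inr rfl) rp t]

theorem startswith_take2 (rest m : List Char) (hm : m.length = 2) :
    PySem.Chars.startswith rest m = true ↔ rest.take 2 = m := by
  rw [PySem.Chars.startswith, List.isPrefixOf_iff_prefix]
  constructor
  · intro h
    have := List.prefix_iff_eq_take.mp h
    rw [hm] at this
    exact this.symm
  · intro h
    rw [List.prefix_iff_eq_take, hm]
    exact h.symm

-- per-line agreement: A's branch on a newline-free line equals B's head ++ remainder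
theorem line_eq (line : List Char) (h : '\n' ∉ line) :
    normLineA line = headB (line.takeWhile wspB) (line.dropWhile wspB) ++ (line.dropWhile wspB) := by
  rw [takeWhile_wspB line h, dropWhile_wspB line h]
  have hsplit : line.takeWhile PySem.Chars.isspace ++ line.dropWhile PySem.Chars.isspace = line :=
    List.takeWhile_append_dropWhile
  set ws := line.takeWhile PySem.Chars.isspace with hws
  set rest := line.dropWhile PySem.Chars.isspace with hrest
  have hl : PySem.Chars.lstrip line = rest := rfl
  have hlen : line.length = ws.length + rest.length := by
    rw [← hsplit, List.length_append]
  rw [normLineA, hl, headB]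
  have hsw : ∀ m, m = (['*', ' '] : List Char) ∨ m = ['-', ' '] →
      (PySem.Chars.startswith rest m = true ↔ rest.take 2 = m) := by
    intro m hm
    apply startswith_take2
    rcases hm with hm | hm <;> subst hm <;> rfl
  by_cases hc : line ≠ [] ∧ (PySem.Chars.startswith rest ['*', ' ']
      || PySem.Chars.startswith rest ['-', ' ']) = true
  · rw [if_pos hc]
    have hmk : rest.take 2 = ['*', ' '] ∨ rest.take 2 = ['-', ' '] := by
      rcases Bool.or_eq_true_iff.mp hc.2 with h2 | h2
      · exact Or.inl ((hsw _ (Or.inl rfl)).mp h2)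
      · exact Or.inr ((hsw _ (Or.inr rfl)).mp h2)
    by_cases hw : ws = []
    · have hw0 : ws.length = 0 := by rw [hw]; rfl
      rw [if_neg (show ¬ line.length - rest.length > 0 by omega)]
      rw [if_neg (show ¬ (ws ≠ [] ∧ (rest.take 2 = ['*', ' '] ∨ rest.take 2 = ['-', ' '])) from
        fun hand => hand.1 hw)]
      rw [hw] at hsplit
      rw [hw, List.nil_append, ← hsplit, List.nil_append]
    · have hwpos : 0 < ws.length := List.length_pos_iff.mpr hw
      rw [if_pos (show line.length - rest.length > 0 by omega)]
      rw [if_pos ⟨hw, hmk⟩]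
      have hz : line.length - rest.length = ws.length := by omega
      rw [hz, Nat.mul_comm]
  · rw [if_neg hc]
    by_cases hnil : line = []
    · subst hnil
      simp only [List.takeWhile_nil, List.dropWhile_nil] at hws hrest ⊢
      rw [if_neg (fun hand => hand.1 hws)]
      rw [hws, hrest]
      rfl
    · have hmk : ¬ (rest.take 2 = ['*', ' '] ∨ rest.take 2 = ['-', ' ']) := by
        intro hor
        apply hc
        refine ⟨hnil, ?_⟩
        rcases hor with h2 | h2
        · simp [(hsw _ (Or.inl rfl)).mpr h2]
        · simp [(hsw _ (Or.inr rfl)).mpr h2]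
      rw [if_neg (fun hand => hmk hand.2)]
      exact hsplit.symm

theorem wspB_nl : wspB '\n' = false := by decide

theorem takeWhile_app_nl (p t : List Char) :
    (p ++ '\n' :: t).takeWhile wspB = p.takeWhile wspB := by
  induction p with
  | nil => simp [wspB_nl]
  | cons c q ih =>
    simp only [List.cons_append, List.takeWhile_cons]
    split <;> simp [ih]

theorem dropWhile_app_nl (p t : List Char) :
    (p ++ '\n' :: t).dropWhile wspB = p.dropWhile wspB ++ '\n' :: t := by
  induction p with
  | nil => simp [wspB_nl]
  | cons c q ih =>
    simp only [List.cons_append, List.dropWhile_cons]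
    split <;> simp [ih]

theorem takeWhile_ne_nl_all (l : List Char) (h : '\n' ∉ l) :
    l.takeWhile (fun c => c ≠ '\n') = l := by
  induction l with
  | nil => rfl
  | cons c t ih =>
    simp only [List.mem_cons, not_or] at h
    simp only [List.takeWhile_cons, decide_eq_true_eq]
    rw [if_pos (fun e => h.1 e.symm), ih h.2]

theorem dropWhile_ne_nl_all (l : List Char) (h : '\n' ∉ l) :
    l.dropWhile (fun c => c ≠ '\n') = [] := by
  induction l with
  | nil => rfl
  | cons c t ih =>
    simp only [List.mem_cons, not_or] at h
    simp only [List.dropWhile_cons, decide_eq_true_eq]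
    rw [if_pos (fun e => h.1 e.symm)]
    exact ih h.2

theorem takeWhile_ne_nl_app (rp t : List Char) (h : '\n' ∉ rp) :
    (rp ++ '\n' :: t).takeWhile (fun c => c ≠ '\n') = rp := by
  induction rp with
  | nil => simp
  | cons c q ih =>
    simp only [List.mem_cons, not_or] at h
    simp only [List.cons_append, List.takeWhile_cons, decide_eq_true_eq]
    rw [if_pos (fun e => h.1 e.symm), ih h.2]

theorem dropWhile_ne_nl_app (rp t : List Char) (h : '\n' ∉ rp) :
    (rp ++ '\n' :: t).dropWhile (fun c => c ≠ '\n') = '\n' :: t := by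
  induction rp with
  | nil => simp
  | cons c q ih =>
    simp only [List.mem_cons, not_or] at h
    simp only [List.cons_append, List.dropWhile_cons, decide_eq_true_eq]
    rw [if_pos (fun e => h.1 e.symm)]
    exact ih h.2

theorem exists_decomp (cs : List Char) (h : '\n' ∈ cs) :
    ∃ p t, cs = p ++ '\n' :: t ∧ '\n' ∉ p := by
  induction cs with
  | nil => simp at h
  | cons c r ih =>
    by_cases hc : c = '\n'
    · subst hc
      exact ⟨[], r, rfl, by simp⟩
    · have h1 : '\n' ∈ r := by
        rcases List.mem_cons.mp h with h1 | h1
        · exact absurd h1.symm hc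
        · exact h1
      rcases ih h1 with ⟨p, t, hdec, hnp⟩
      refine ⟨c :: p, t, by rw [hdec]; rfl, ?_⟩
      intro hm
      rcases List.mem_cons.mp hm with e | e
      · exact hc e.symm
      · exact hnp e

-- main loop agreement
theorem main_eq (cs : List Char) :
    PySem.Chars.join ['\n'] ((mySplit [] cs).map normLineA) = bGo cs := by
  by_cases h : '\n' ∈ cs
  · rcases exists_decomp cs h with ⟨p, t, hdec, hp⟩
    subst hdec
    have ih := main_eq t
    rw [mySplit_nl p [] t hp, List.nil_append, List.map_cons]
    rcases hq : mySplit [] t with _ | ⟨q, qs⟩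
    · exact absurd hq (mySplit_ne_nil [] t)
    · rw [List.map_cons, PySem.Chars.join_cons_cons]
      rw [hq, List.map_cons] at ih
      rw [bGo, takeWhile_app_nl, dropWhile_app_nl]
      have hrp : '\n' ∉ p.dropWhile wspB := fun hm => hp ((List.dropWhile_sublist _).mem hm)
      rw [takeWhile_ne_nl_app _ t hrp, headB_app, line_eq p hp]
      split
      · rename_i heq
        rw [dropWhile_ne_nl_app _ t hrp] at heq
        cases heq
      · rename_i c' t' heq
        rw [dropWhile_ne_nl_app _ t hrp] at heq
        cases heq
        rw [← ih]
        simp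
  · rw [mySplit_no_nl cs [] h, List.nil_append, List.map, List.map, PySem.Chars.join_singleton]
    rw [bGo]
    have hrp : '\n' ∉ cs.dropWhile wspB := fun hm => h ((List.dropWhile_sublist _).mem hm)
    rw [takeWhile_ne_nl_all _ hrp, line_eq cs h]
    split
    · simp
    · rename_i c' t' heq
      rw [dropWhile_ne_nl_all _ hrp] at heq
      cases heq
termination_by cs.length
decreasing_by
  subst hdec
  simp only [List.length_append, List.length_cons]
  omega

-- ===== VERDICT (by name: the statement is the Claim_ definition above) =====
theorem normalize_list_indentation_py_spec : Claim_equal_normalize_list_indentation_py := by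
  intro text _
  unfold Spec_normalize_list_indentation_py normalize_list_indentation_py normalize_list_indentation_py_alt
  rw [splitOn_eq, main_eq]
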